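-- pv_equiv track=rewrite | github.com/Dasyure/tutoring | cs1531/21t3/week03/vowel_sol.py | find_vowels
-- ===== SOURCE A (Python) =====
-- def find_vowels(message):
--     # vowels = {'a':0, 'e':0, 'i':0, ...}
--     vowels = {}
--     for character in message:
--         if character.isupper():
--             raise ValueError
--         if character in 'aeiou':
--             vowels[character] = vowels.get(character, 0) + 1
--     return vowels
-- ===== SOURCE B (Python) =====
-- def find_vowels(message):
--     if any(c.isupper() for c in message):
--         raise ValueError
--     present = dict.fromkeys(c for c in message if c in 'aeiou')
--     return {c: message.count(c) for c in present}
-- ===== Notes on version B (the rewrite author's own statement) =====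
-- stated objective: simpler
-- what changed: Replaces the single accumulating dict-counter pass with a validate-first scan, an ordered dedup of the vowels present, and per-vowel str.count; Pre_ excludes strings containing an uppercase character, where A raises ValueError (B raises too).
import Mathlib
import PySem

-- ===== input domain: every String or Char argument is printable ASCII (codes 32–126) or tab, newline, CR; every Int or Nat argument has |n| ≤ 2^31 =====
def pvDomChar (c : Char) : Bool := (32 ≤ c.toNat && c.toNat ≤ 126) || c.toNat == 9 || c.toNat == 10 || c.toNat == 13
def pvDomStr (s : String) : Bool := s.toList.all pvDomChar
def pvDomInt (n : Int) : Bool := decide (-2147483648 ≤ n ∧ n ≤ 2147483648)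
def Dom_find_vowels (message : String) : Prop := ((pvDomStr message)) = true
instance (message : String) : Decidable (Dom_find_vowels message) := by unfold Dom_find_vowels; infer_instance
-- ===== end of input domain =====

-- B replaces A's single accumulating dict-counter pass by a validate-first scan, an ordered
-- dedup (dict.fromkeys) of the vowels present, and per-vowel str.count (objective: simpler).

-- ===== PORT A =====
-- for character in message: (raise on upper — excluded by Pre_); if character in 'aeiou':
-- vowels[character] = vowels.get(character, 0) + 1; return vowels
def find_vowels (message : String) : List (String × Int) :=
  (message.toList.foldl
    (fun (d : PySem.Dict String Int) character =>
      if PySem.Chars.isIn [character] "aeiou".toList then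
        d.insert (String.ofList [character]) (d.getD (String.ofList [character]) 0 + 1)
      else d)
    PySem.Dict.empty).items

-- ===== PORT B =====
-- present = dict.fromkeys(c for c in message if c in 'aeiou'); {c: message.count(c) for c in present}
def find_vowels_alt (message : String) : List (String × Int) :=
  (PySem.List.dedup (message.toList.filter (fun c => PySem.Chars.isIn [c] "aeiou".toList))).map
    (fun c => (String.ofList [c], (PySem.Chars.count message.toList [c] : Int)))

-- ===== PRECONDITION & SPEC =====
-- A raises ValueError as soon as it meets an uppercase character; Pre_ excludes such strings (B raises there too).
def Pre_find_vowels (message : String) : Prop :=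
  message.toList.all (fun c => !PySem.Chars.isupper c) = true
instance (message : String) : Decidable (Pre_find_vowels message) := by unfold Pre_find_vowels; infer_instance

def pvWitness_find_vowels : String := "hi ae"

def Spec_find_vowels (message : String) (out : List (String × Int)) : Prop := out = find_vowels_alt message
instance (message : String) (out : List (String × Int)) : Decidable (Spec_find_vowels message out) := by unfold Spec_find_vowels; infer_instance

-- ===== CLAIM (what is proved, stated in full; the proofs are below) =====
def Claim_equal_find_vowels : Prop := ∀ (message : String), Dom_find_vowels message → Pre_find_vowels message → Spec_find_vowels message (find_vowels message)

-- ===== LEMMAS AND PROOFS =====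

-- counting one character as a substring is counting it as an element
theorem count_go_single (c : Char) :
    ∀ (l : List Char) (fuel acc : Nat), l.length ≤ fuel →
      PySem.Chars.count.go [c] fuel l acc = acc + l.count c := by
  intro l
  induction l with
  | nil => intro fuel acc _; cases fuel <;> simp [PySem.Chars.count.go]
  | cons h t ih =>
    intro fuel acc hle
    cases fuel with
    | zero => simp at hle
    | succ n =>
      simp only [List.length_cons, Nat.succ_le_succ_iff] at hle
      by_cases hc : h = c
      · subst hc
        simp [PySem.Chars.count.go, List.isPrefixOf, ih n (acc + 1) hle, List.count_cons_self]
        omega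
      · have hpre : [c].isPrefixOf (h :: t) = false := by
          simp [List.isPrefixOf]; exact fun hh => (hc hh.symm).elim
        simp [PySem.Chars.count.go, hpre, ih n acc hle, hc]

theorem foldl_add_map {α β : Type} [DecidableEq α] [DecidableEq β]
    (f : α → β) (hf : Function.Injective f) :
    ∀ (l : List α) (s : List α),
      List.foldl PySem.Set.add ((s.map f : List β) : PySem.Set β) (l.map f)
        = (List.foldl PySem.Set.add (s : PySem.Set α) l).map f := by
  intro l
  induction l with
  | nil => intro s; simp
  | cons h t ih =>
    intro s
    have hcont : PySem.Set.contains (s.map f) (f h) = PySem.Set.contains s h := by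
      simp [PySem.Set.contains, hf.eq_iff]
    have hadd : PySem.Set.add ((s.map f : List β) : PySem.Set β) (f h)
        = ((PySem.Set.add (s : PySem.Set α) h : List α).map f : List β) := by
      unfold PySem.Set.add
      rw [hcont]
      by_cases hm : h ∈ s <;> simp [hm]
    simp only [List.map_cons, List.foldl_cons, hadd]
    exact ih (PySem.Set.add s h)

theorem count_single (s : List Char) (c : Char) :
    PySem.Chars.count s [c] = s.count c := by
  simp only [PySem.Chars.count, List.isEmpty_cons, Bool.false_eq_true, if_false]
  simpa using count_go_single c s s.length 0 le_rfl

-- Set.ofList commutes with mapping an injective function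
theorem ofList_map_inj {α β : Type} [DecidableEq α] [DecidableEq β]
    (f : α → β) (hf : Function.Injective f) (l : List α) :
    (PySem.Set.ofList (l.map f) : List β) = (PySem.Set.ofList l : List α).map f := by
  simpa [PySem.Set.ofList, PySem.Set.empty] using foldl_add_map f hf l []

theorem ofList_inj : Function.Injective (fun c : Char => String.ofList [c]) := by
  intro a b h
  have := congrArg String.toList h
  simpa using this

-- ===== VERDICT (by name: the statement is the Claim_ definition above) =====
theorem find_vowels_spec : Claim_equal_find_vowels := by
  intro message _ _
  unfold Spec_find_vowels find_vowels find_vowels_alt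
  set p : Char → Bool := fun c => PySem.Chars.isIn [c] "aeiou".toList with hp
  set fl : List Char := message.toList.filter p with hfl
  -- A: fold with guard = counter of the filtered, key-mapped list
  rw [PySem.List.foldl_if_eq_foldl_filter p _ message.toList PySem.Dict.empty]
  have hstep :
      (fl.foldl (fun (d : PySem.Dict String Int) c =>
          d.insert (String.ofList [c]) (d.getD (String.ofList [c]) 0 + 1)) PySem.Dict.empty)
        = (fl.map (fun c => String.ofList [c])).foldl
            (fun (d : PySem.Dict String Int) k => d.insert k (d.getD k 0 + 1)) PySem.Dict.empty := by
    rw [List.foldl_map]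
  rw [hstep, PySem.Dict.foldl_insert_getD_add_one_eq_counter, PySem.Dict.items_counter]
  rw [ofList_map_inj _ ofList_inj, List.map_map, PySem.List.dedup]
  apply List.map_congr_left
  intro c hc
  have hcfl : c ∈ fl := (PySem.Set.mem_ofList fl c).mp hc
  have hpc : p c = true := (List.mem_filter.mp (hfl ▸ hcfl)).2
  simp only [Function.comp]
  congr 1
  rw [List.count_map_of_injective fl _ ofList_inj c, count_single, hfl,
    List.count_filter]
  simp [hpc]
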